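-- pv_equiv track=rewrite | github.com/ResulGulduren/POKER | high_card.py | find_high_card_winner
-- ===== SOURCE A (Python) =====
-- def rank_to_value(rank):
--     rank_values = {'A': 14, 'K': 13, 'Q': 12, 'J': 11, '10': 10, '9': 9, '8': 8, '7': 7, '6': 6, '5': 5, '4': 4, '3': 3, '2': 2}
--     return rank_values.get(rank, 0)
--
-- def find_high_card_winner(players, community_cards):
--     max_rank = -1
--     winners = []
--
--     for player, hand in players.items():
--         all_cards = hand + community_cards
--         rank_values = [rank_to_value(card[:-1]) for card in all_cards]
--         max_hand_rank = max(rank_values)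
--
--         if max_hand_rank > max_rank:
--             max_rank = max_hand_rank
--             winners = [player]
--         elif max_hand_rank == max_rank:
--             winners.append(player)
--
--     return winners
-- ===== SOURCE B (Python) =====
-- def rank_to_value(rank):
--     rank_values = {'A': 14, 'K': 13, 'Q': 12, 'J': 11, '10': 10, '9': 9, '8': 8, '7': 7, '6': 6, '5': 5, '4': 4, '3': 3, '2': 2}
--     return rank_values.get(rank, 0)
--
-- def find_high_card_winner(players, community_cards):
--     if not players:
--         return []
--     best = {player: max(rank_to_value(card[:-1]) for card in hand + community_cards)
--             for player, hand in players.items()}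
--     top = max(best.values())
--     return [player for player in players if best[player] == top]
-- ===== Notes on version B (the rewrite author's own statement) =====
-- stated objective: alternative
-- what changed: A's single interleaved running-max pass that resets/extends the winners list inline is replaced by a three-step decomposition: build a best-card table per player, take the maximum of its values, then filter the players whose best equals it; Pre_ excludes inputs where some player's hand plus community cards is empty (both A and B raise ValueError on max() of an empty sequence there) and association lists with duplicate player keys, which represent no Python dict.
import Mathlib
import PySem

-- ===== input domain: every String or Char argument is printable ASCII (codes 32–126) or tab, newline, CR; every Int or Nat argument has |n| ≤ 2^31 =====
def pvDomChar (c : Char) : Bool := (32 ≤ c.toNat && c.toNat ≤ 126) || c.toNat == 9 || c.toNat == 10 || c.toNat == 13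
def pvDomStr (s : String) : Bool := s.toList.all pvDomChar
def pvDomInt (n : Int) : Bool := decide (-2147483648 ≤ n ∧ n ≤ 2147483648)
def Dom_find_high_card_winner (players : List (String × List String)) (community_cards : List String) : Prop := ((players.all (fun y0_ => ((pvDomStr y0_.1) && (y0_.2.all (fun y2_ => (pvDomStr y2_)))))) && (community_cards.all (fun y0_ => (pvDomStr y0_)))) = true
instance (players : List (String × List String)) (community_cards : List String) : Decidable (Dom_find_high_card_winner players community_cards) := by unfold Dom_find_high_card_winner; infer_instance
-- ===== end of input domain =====

-- B replaces A's single interleaved running-max/reset pass with a build-best-table,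
-- take-max, filter decomposition (objective: alternative; same return values).

-- ===== PORT A =====
-- shared helper: the module-level rank_to_value, used verbatim by both A and B
def rank_to_value (rank : String) : Int :=
  let rank_values : PySem.Dict String Int :=
    PySem.Dict.mk [("A", 14), ("K", 13), ("Q", 12), ("J", 11), ("10", 10), ("9", 9),
                   ("8", 8), ("7", 7), ("6", 6), ("5", 5), ("4", 4), ("3", 3), ("2", 2)]
  rank_values.getD rank 0

def find_high_card_winner (players : List (String × List String)) (community_cards : List String) : List String :=
  let st := players.foldl (fun (st : Int × List String) pr =>
    let all_cards := pr.2 ++ community_cards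
    let rank_values := all_cards.map (fun card => rank_to_value (PySem.Str.slice card none (some (-1))))
    match PySem.List.max? rank_values (fun v => v) with
    | none => st  -- Python raises ValueError here (empty card pool); excluded by Pre_
    | some max_hand_rank =>
      if max_hand_rank > st.1 then (max_hand_rank, [pr.1])
      else if max_hand_rank = st.1 then (st.1, st.2 ++ [pr.1])
      else st) (-1, [])
  st.2

-- ===== PORT B =====
def find_high_card_winner_alt (players : List (String × List String)) (community_cards : List String) : List String :=
  if players.isEmpty then []
  else
    -- dict comprehension {player: max(...)} as an association list over players.items()
    let best : List (String × Int) := players.map (fun pr =>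
      (pr.1, match PySem.List.max? ((pr.2 ++ community_cards).map
               (fun card => rank_to_value (PySem.Str.slice card none (some (-1))))) (fun v => v) with
             | some m => m
             | none => 0))  -- Python raises ValueError here (empty card pool); excluded by Pre_
    match PySem.List.max? (best.map (fun kv => kv.2)) (fun v => v) with
    | none => []  -- unreachable: players is nonempty here
    | some top =>
      (players.map (fun pr => pr.1)).filter (fun name =>
        ((best.find? (fun kv => kv.1 == name)).map (fun kv => kv.2)) == some top)

-- ===== PRECONDITION & SPEC =====
-- Pre_ excludes (a) inputs where some player's hand + community_cards is empty, on which A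
-- (and B alike) raise ValueError on max() of an empty sequence, and (b) association lists with
-- duplicate player keys, which represent no Python dict (players is a dict in the source).
def Pre_find_high_card_winner (players : List (String × List String)) (community_cards : List String) : Prop :=
  (players.map Prod.fst).Nodup ∧ ∀ pr ∈ players, pr.2 ++ community_cards ≠ []
instance (players : List (String × List String)) (community_cards : List String) : Decidable (Pre_find_high_card_winner players community_cards) := by unfold Pre_find_high_card_winner; infer_instance

def pvWitness_find_high_card_winner : (List (String × List String)) × List String :=
  ([("alice", ["AH", "3d"]), ("bob", ["KS"])], ["10c"])

def Spec_find_high_card_winner (players : List (String × List String)) (community_cards : List String) (out : List String) : Prop := out = find_high_card_winner_alt players community_cards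
instance (players : List (String × List String)) (community_cards : List String) (out : List String) : Decidable (Spec_find_high_card_winner players community_cards out) := by unfold Spec_find_high_card_winner; infer_instance

-- ===== CLAIM (what is proved, stated in full; the proofs are below) =====
def Claim_equal_find_high_card_winner : Prop := ∀ (players : List (String × List String)) (community_cards : List String), Dom_find_high_card_winner players community_cards → Pre_find_high_card_winner players community_cards → Spec_find_high_card_winner players community_cards (find_high_card_winner players community_cards)

-- ===== LEMMAS AND PROOFS =====

-- the per-player best-card value both programs compute
def bestVal (community_cards : List String) (pr : String × List String) : Int :=
  match PySem.List.max? ((pr.2 ++ community_cards).map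
          (fun card => rank_to_value (PySem.Str.slice card none (some (-1))))) (fun v => v) with
  | some m => m
  | none => 0

theorem rank_to_value_nonneg (r : String) : 0 ≤ rank_to_value r := by
  have hrfl : rank_to_value r = PySem.Dict.getD (PySem.Dict.mk [("A", 14), ("K", 13), ("Q", 12), ("J", 11), ("10", 10), ("9", 9), ("8", 8), ("7", 7), ("6", 6), ("5", 5), ("4", 4), ("3", 3), ("2", 2)]) r 0 := rfl
  rw [hrfl, PySem.Dict.getD_eq_get?_getD]
  rcases h : PySem.Dict.get? (PySem.Dict.mk [("A", 14), ("K", 13), ("Q", 12), ("J", 11), ("10", 10), ("9", 9), ("8", 8), ("7", 7), ("6", 6), ("5", 5), ("4", 4), ("3", 3), ("2", 2)]) r with _ | v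
  · simp
  · simp only [Option.getD_some]
    have hmem := PySem.Dict.mem_items_of_get?_eq_some _ h
    simp only [List.mem_cons, List.not_mem_nil, or_false, Prod.mk.injEq] at hmem
    rcases hmem with ⟨_, rfl⟩|⟨_, rfl⟩|⟨_, rfl⟩|⟨_, rfl⟩|⟨_, rfl⟩|⟨_, rfl⟩|⟨_, rfl⟩|⟨_, rfl⟩|⟨_, rfl⟩|⟨_, rfl⟩|⟨_, rfl⟩|⟨_, rfl⟩|⟨_, rfl⟩ <;> norm_num

theorem bestVal_nonneg (cc : List String) (pr : String × List String) : 0 ≤ bestVal cc pr := by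
  unfold bestVal
  split
  · next m h =>
    have hm := PySem.List.max?_mem h
    rcases List.mem_map.1 hm with ⟨c, _, rfl⟩
    exact rank_to_value_nonneg _
  · exact le_refl 0

-- the starting value is a lower bound of the running max
theorem le_foldl_maxf (f : (String × List String) → Int) (t : List (String × List String)) (M : Int) :
    M ≤ t.foldl (fun m pr => max m (f pr)) M := by
  rw [← List.foldl_map]
  exact (PySem.List.le_foldl_max (t.map f) M).1

-- characterisation of A's running-max/reset loop: the final max is the fold of max, and
-- the final winners are (after any strict improvement) exactly the tying names, in order
theorem foldl_step_eq (f : (String × List String) → Int) (l : List (String × List String)) :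
    ∀ (M : Int) (W : List String),
    l.foldl (fun st pr =>
      if f pr > st.1 then (f pr, [pr.1])
      else if f pr = st.1 then (st.1, st.2 ++ [pr.1])
      else st) (M, W)
    = (l.foldl (fun m pr => max m (f pr)) M,
       (if l.foldl (fun m pr => max m (f pr)) M = M then W else [])
         ++ (l.filter (fun pr => f pr == (l.foldl (fun m pr => max m (f pr)) M))).map Prod.fst) := by
  induction l with
  | nil => intro M W; simp
  | cons a t ih =>
    intro M W
    simp only [List.foldl_cons]
    by_cases h1 : f a > M
    · have hM : max M (f a) = f a := by omega
      rw [if_pos h1]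
      simp only [hM]
      refine (ih (f a) [a.1]).trans ?_
      have hle := le_foldl_maxf f t (f a)
      have hne : ¬ (t.foldl (fun m pr => max m (f pr)) (f a) = M) := by omega
      rw [if_neg hne, List.filter_cons]
      by_cases h2 : f a = t.foldl (fun m pr => max m (f pr)) (f a)
      · have hb : (f a == t.foldl (fun m pr => max m (f pr)) (f a)) = true := beq_iff_eq.mpr h2
        have h2' : t.foldl (fun m pr => max m (f pr)) (f a) = f a := h2.symm
        rw [if_pos h2', hb]
        simp
      · have hb : (f a == t.foldl (fun m pr => max m (f pr)) (f a)) = false :=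
          beq_eq_false_iff_ne.mpr h2
        have h2' : ¬ (t.foldl (fun m pr => max m (f pr)) (f a) = f a) := fun h => h2 h.symm
        rw [if_neg h2', hb]
        simp
    · have hgt : ¬ (f a > M) := h1
      by_cases h2 : f a = M
      · have hM : max M (f a) = M := by omega
        rw [if_neg hgt, if_pos h2]
        simp only [hM]
        refine (ih M (W ++ [a.1])).trans ?_
        rw [List.filter_cons]
        by_cases h3 : t.foldl (fun m pr => max m (f pr)) M = M
        · have hb : (f a == t.foldl (fun m pr => max m (f pr)) M) = true :=
            beq_iff_eq.mpr (h2.trans h3.symm)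
          rw [if_pos h3, if_pos h3, hb]
          simp
        · have hb : (f a == t.foldl (fun m pr => max m (f pr)) M) = false :=
            beq_eq_false_iff_ne.mpr (fun h => h3 (h.symm.trans h2))
          rw [if_neg h3, if_neg h3, hb]
          simp
      · have hM : max M (f a) = M := by omega
        rw [if_neg hgt, if_neg h2]
        simp only [hM]
        refine (ih M W).trans ?_
        rw [List.filter_cons]
        have hle := le_foldl_maxf f t M
        have hb : (f a == t.foldl (fun m pr => max m (f pr)) M) = false :=
          beq_eq_false_iff_ne.mpr (by omega)
        rw [hb]
        simp

-- first-match lookup in the best table of a Nodup-keyed players list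
theorem find?_best (cc : List String) (l : List (String × List String))
    (nd : (l.map Prod.fst).Nodup) (a : String × List String) (ha : a ∈ l) :
    (l.map (fun pr => (pr.1, bestVal cc pr))).find? (fun kv => kv.1 == a.1)
      = some (a.1, bestVal cc a) := by
  induction l with
  | nil => cases ha
  | cons q t ih =>
    simp only [List.map_cons, List.find?_cons]
    rcases List.mem_cons.1 ha with rfl | ha
    · simp
    · have hne : q.1 ≠ a.1 := by
        intro h
        have : a.1 ∈ t.map Prod.fst := List.mem_map.2 ⟨a, ha, rfl⟩
        rw [← h] at this
        exact (List.nodup_cons.1 nd).1 this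
      have hb : (q.1 == a.1) = false := beq_eq_false_iff_ne.mpr hne
      rw [hb]
      exact ih (List.nodup_cons.1 nd).2 ha

-- ===== VERDICT (by name: the statement is the Claim_ definition above) =====
theorem find_high_card_winner_spec : Claim_equal_find_high_card_winner := by
  intro players cc _ hpre
  obtain ⟨nd, hnonempty⟩ := hpre
  unfold Spec_find_high_card_winner find_high_card_winner find_high_card_winner_alt
  -- replace A's match-step by the pure step on bestVal
  have hA : players.foldl (fun (st : Int × List String) pr =>
      let all_cards := pr.2 ++ cc
      let rank_values := all_cards.map (fun card => rank_to_value (PySem.Str.slice card none (some (-1))))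
      match PySem.List.max? rank_values (fun v => v) with
      | none => st
      | some max_hand_rank =>
        if max_hand_rank > st.1 then (max_hand_rank, [pr.1])
        else if max_hand_rank = st.1 then (st.1, st.2 ++ [pr.1])
        else st) (-1, [])
      = players.foldl (fun st pr =>
        if bestVal cc pr > st.1 then (bestVal cc pr, [pr.1])
        else if bestVal cc pr = st.1 then (st.1, st.2 ++ [pr.1])
        else st) (-1, []) := by
    apply PySem.List.foldl_congr_mem
    intro acc pr hpr
    have hne : (pr.2 ++ cc).map (fun card => rank_to_value (PySem.Str.slice card none (some (-1)))) ≠ [] := by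
      simp only [ne_eq, List.map_eq_nil_iff]
      exact hnonempty pr hpr
    rcases hm : PySem.List.max? ((pr.2 ++ cc).map (fun card => rank_to_value (PySem.Str.slice card none (some (-1))))) (fun v => v) with _ | m
    · exact absurd (PySem.List.max?_eq_none_iff _ _ |>.1 hm) hne
    · have hbv : bestVal cc pr = m := by unfold bestVal; rw [hm]
      simp only [hm, hbv]
  rw [hA, foldl_step_eq (bestVal cc) players (-1) []]
  simp only [ite_self, List.nil_append]
  cases players with
  | nil => simp
  | cons p rest =>
    rw [if_neg (by simp)]
    -- B's top is the same running max
    have hmapcons : (((p :: rest).map (fun pr => (pr.1, bestVal cc pr))).map (fun kv => kv.2))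
        = bestVal cc p :: rest.map (bestVal cc) := by
      simp [Function.comp_def]
    have hT : (p :: rest).foldl (fun m pr => max m (bestVal cc pr)) (-1)
        = (rest.map (bestVal cc)).foldl max (bestVal cc p) := by
      have h0 : max (-1) (bestVal cc p) = bestVal cc p := by
        have := bestVal_nonneg cc p; omega
      rw [List.foldl_cons, h0, List.foldl_map]
    have hBmap : ((p :: rest).map (fun pr =>
        (pr.1, match PySem.List.max? ((pr.2 ++ cc).map
                 (fun card => rank_to_value (PySem.Str.slice card none (some (-1))))) (fun v => v) with
               | some m => m
               | none => 0)))
        = (p :: rest).map (fun pr => (pr.1, bestVal cc pr)) := rfl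
    rw [hBmap, hmapcons, PySem.List.max?_id_cons]
    dsimp only
    rw [← hT, List.filter_map]
    congr 1
    apply List.filter_congr
    intro pr hpr
    have hfind := find?_best cc (p :: rest) nd pr hpr
    simp only [Function.comp_apply]
    rw [hfind]
    simp
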